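-- pv_equiv track=rewrite | github.com/JLev-data/boilerplate-rock-paper-scissors | RPS.py | make_combinaisons
-- ===== SOURCE A (Python) =====
-- def make_combinaisons(possibilities,lenght):
--     if lenght == 1:
--         return possibilities
--     else:
--         combinaisons_list = []
--         for i in possibilities:
--             for j in make_combinaisons(possibilities,lenght-1):
--                 combinaisons_list.append(i+j)
--
--     return combinaisons_list
-- ===== SOURCE B (Python) =====
-- def make_combinaisons(possibilities, lenght):
--     combos = possibilities
--     for _ in range(lenght - 1):
--         combos = [p + s for p in possibilities for s in combos]
--     return combos
-- ===== Notes on version B (the rewrite author's own statement) =====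
-- stated objective: alternative
-- what changed: Replaced the recursion that recomputes the full length-(L-1) result once per outer-loop element with a single iterative product loop that builds each level exactly once.
import Mathlib
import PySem

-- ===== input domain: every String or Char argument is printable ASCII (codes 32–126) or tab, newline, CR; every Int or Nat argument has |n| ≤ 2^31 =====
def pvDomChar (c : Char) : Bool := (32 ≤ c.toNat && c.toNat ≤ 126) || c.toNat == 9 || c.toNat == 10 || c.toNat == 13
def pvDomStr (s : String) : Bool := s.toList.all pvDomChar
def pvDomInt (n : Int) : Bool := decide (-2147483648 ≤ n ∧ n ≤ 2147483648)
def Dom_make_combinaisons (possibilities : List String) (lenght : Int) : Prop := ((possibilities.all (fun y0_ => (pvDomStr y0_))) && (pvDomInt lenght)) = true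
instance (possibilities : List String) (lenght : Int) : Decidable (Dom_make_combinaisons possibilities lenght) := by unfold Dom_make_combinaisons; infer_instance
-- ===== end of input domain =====

-- B replaces A's recursion (which recomputes the whole length-(L-1) result once per outer element)
-- by a single iterative loop building each level once: objective 'alternative'.

-- ===== PORT A =====
-- A recurses on `lenght`, decrementing by 1 and stopping at 1; `go` runs that recursion on the
-- fuel `lenght.toNat` (for lenght ≤ 0 the Python diverges unless possibilities = [], where every
-- loop is over the empty list and returns []; `go _ 0 = []` matches exactly that case).
def make_combinaisons_go (possibilities : List String) : Nat → List String
  | 0 => []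
  | 1 => possibilities
  | n + 2 =>
      -- for i in possibilities: for j in make_combinaisons(possibilities, lenght-1): append i+j
      possibilities.foldl
        (fun acc i => acc ++ (make_combinaisons_go possibilities (n + 1)).map (fun j => i ++ j))
        []

def make_combinaisons (possibilities : List String) (lenght : Int) : List String :=
  make_combinaisons_go possibilities lenght.toNat

-- ===== PORT B =====
def make_combinaisons_alt (possibilities : List String) (lenght : Int) : List String :=
  (PySem.List.pyRange 0 (lenght - 1) 1).foldl
    (fun combos _ => possibilities.flatMap (fun p => combos.map (fun s => p ++ s)))
    possibilities

-- ===== PRECONDITION & SPEC =====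
-- Pre_ excludes exactly the inputs where A raises RecursionError: lenght ≤ 0 with a nonempty list.
def Pre_make_combinaisons (possibilities : List String) (lenght : Int) : Prop :=
  1 ≤ lenght ∨ possibilities = []
instance (possibilities : List String) (lenght : Int) : Decidable (Pre_make_combinaisons possibilities lenght) := by unfold Pre_make_combinaisons; infer_instance
def pvWitness_make_combinaisons : List String × Int := (["R", "P", "S"], 3)

def Spec_make_combinaisons (possibilities : List String) (lenght : Int) (out : List String) : Prop := out = make_combinaisons_alt possibilities lenght
instance (possibilities : List String) (lenght : Int) (out : List String) : Decidable (Spec_make_combinaisons possibilities lenght out) := by unfold Spec_make_combinaisons; infer_instance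

-- ===== CLAIM (what is proved, stated in full; the proofs are below) =====
def Claim_equal_make_combinaisons : Prop := ∀ (possibilities : List String) (lenght : Int), Dom_make_combinaisons possibilities lenght → Pre_make_combinaisons possibilities lenght → Spec_make_combinaisons possibilities lenght (make_combinaisons possibilities lenght)

-- ===== LEMMAS AND PROOFS =====

-- A's level n+1 equals n iterations of B's product step.
theorem go_eq_iter (possibilities : List String) (n : Nat) :
    make_combinaisons_go possibilities (n + 1) =
      (PySem.List.pyRange 0 (n : Int) 1).foldl
        (fun combos _ => possibilities.flatMap (fun p => combos.map (fun s => p ++ s)))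
        possibilities := by
  induction n with
  | zero => simp [make_combinaisons_go, PySem.List.pyRange_one_eq_nil]
  | succ n ih =>
      have hsplit : PySem.List.pyRange 0 ((n + 1 : Nat) : Int) 1 =
          PySem.List.pyRange 0 (n : Int) 1 ++ [(n : Int)] := by
        push_cast
        exact PySem.List.pyRange_one_succ_right (by positivity)
      rw [show (n + 1 + 1 : Nat) = (n + 1) + 1 from rfl]
      show make_combinaisons_go possibilities ((n + 1) + 1) = _
      rw [hsplit, List.foldl_append, ← ih]
      simp only [make_combinaisons_go, List.foldl_cons, List.foldl_nil]
      exact PySem.List.foldl_append_eq_flatMap _ possibilities []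

theorem go_empty (n : Nat) : make_combinaisons_go [] n = [] := by
  match n with
  | 0 => rfl
  | 1 => rfl
  | n + 2 => rfl

-- ===== VERDICT (by name: the statement is the Claim_ definition above) =====
theorem make_combinaisons_spec : Claim_equal_make_combinaisons := by
  intro possibilities lenght _ hpre
  unfold Spec_make_combinaisons make_combinaisons make_combinaisons_alt
  rcases hpre with h1 | hemp
  · have hn : lenght.toNat = (lenght.toNat - 1) + 1 := by omega
    have hc : ((lenght.toNat - 1 : Nat) : Int) = lenght - 1 := by omega
    rw [hn, go_eq_iter, hc]
  · subst hemp
    rw [go_empty]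
    symm
    exact List.foldl_fixed' (congrFun rfl) _
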